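-- pv_equiv track=rewrite | github.com/hangpark123/LG_STT | compare_web/server.py | map_channel_names
-- ===== SOURCE A (Python) =====
-- from typing import Awaitable, Callable, Dict, List, Tuple
--
-- CHANNEL_NAME_ORDER = ["tx", "rx", "ch3", "ch4", "ch5", "ch6", "ch7", "ch8"]
--
-- def map_channel_names(count: int) -> List[str]:
--     names = []
--     for idx in range(count):
--         if idx < len(CHANNEL_NAME_ORDER):
--             names.append(CHANNEL_NAME_ORDER[idx])
--         else:
--             names.append(f"ch{idx + 1}")
--     return names
-- ===== SOURCE B (Python) =====
-- from typing import Awaitable, Callable, Dict, List, Tuple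
--
-- CHANNEL_NAME_ORDER = ["tx", "rx", "ch3", "ch4", "ch5", "ch6", "ch7", "ch8"]
--
-- def map_channel_names(count: int) -> List[str]:
--     n = max(0, count)
--     prefix = CHANNEL_NAME_ORDER[:n]
--     tail = [f"ch{i + 1}" for i in range(len(CHANNEL_NAME_ORDER), n)]
--     return prefix + tail
-- ===== Notes on version B (the rewrite author's own statement) =====
-- stated objective: simpler
-- what changed: Replaces the indexed loop with a per-element branch by two branch-free passes: a slice prefix of the name table plus a generated 'chN' tail for the overflow range.
import Mathlib
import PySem

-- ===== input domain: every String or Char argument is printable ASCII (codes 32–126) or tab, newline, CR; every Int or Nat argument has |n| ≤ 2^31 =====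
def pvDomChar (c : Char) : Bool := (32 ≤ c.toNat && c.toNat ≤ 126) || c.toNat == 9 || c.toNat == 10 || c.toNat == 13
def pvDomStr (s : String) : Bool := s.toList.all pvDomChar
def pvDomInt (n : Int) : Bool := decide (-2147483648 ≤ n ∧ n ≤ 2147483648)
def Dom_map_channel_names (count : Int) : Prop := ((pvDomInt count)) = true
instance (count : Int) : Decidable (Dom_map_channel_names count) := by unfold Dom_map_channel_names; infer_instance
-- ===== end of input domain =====

-- B replaces the indexed loop-with-branch by a table slice plus a generated overflow tail (simpler decomposition, same cost).

-- ===== PORT A =====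
def CHANNEL_NAME_ORDER : List String := ["tx", "rx", "ch3", "ch4", "ch5", "ch6", "ch7", "ch8"]

def map_channel_names (count : Int) : List String :=
  (PySem.List.pyRange 0 count 1).foldl
    (fun names idx =>
      names ++ [if idx < (CHANNEL_NAME_ORDER.length : Int)
                then PySem.List.pyGetD CHANNEL_NAME_ORDER idx ""
                else "ch" ++ PySem.Int.toStr (idx + 1)]) []

-- ===== PORT B =====
def map_channel_names_alt (count : Int) : List String :=
  PySem.List.slice CHANNEL_NAME_ORDER none (some (max 0 count)) ++
    (PySem.List.pyRange (CHANNEL_NAME_ORDER.length : Int) (max 0 count) 1).map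
      (fun i => "ch" ++ PySem.Int.toStr (i + 1))

-- ===== PRECONDITION & SPEC =====
def Spec_map_channel_names (count : Int) (out : List String) : Prop := out = map_channel_names_alt count
instance (count : Int) (out : List String) : Decidable (Spec_map_channel_names count out) := by unfold Spec_map_channel_names; infer_instance

-- ===== CLAIM (what is proved, stated in full; the proofs are below) =====
def Claim_equal_map_channel_names : Prop := ∀ (count : Int), Dom_map_channel_names count → Spec_map_channel_names count (map_channel_names count)

-- ===== LEMMAS AND PROOFS =====

theorem mcn_a_succ (m : Nat) :
    map_channel_names ((m : Int) + 1) = map_channel_names m ++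
      [if (m : Int) < (CHANNEL_NAME_ORDER.length : Int)
       then PySem.List.pyGetD CHANNEL_NAME_ORDER m ""
       else "ch" ++ PySem.Int.toStr ((m : Int) + 1)] := by
  unfold map_channel_names
  rw [PySem.List.pyRange_one_succ_right (by positivity)]
  simp [List.foldl]

theorem mcn_nat (m : Nat) : map_channel_names (m : Int) = map_channel_names_alt (m : Int) := by
  induction m with
  | zero => decide
  | succ m ih =>
    have hns : ((m + 1 : Nat) : Int) = (m : Int) + 1 := by push_cast; ring
    rw [hns, mcn_a_succ, ih]
    unfold map_channel_names_alt
    have hmax : ∀ k : Int, 0 ≤ k → max (0 : Int) k = k := fun k hk => max_eq_right hk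
    rw [hmax _ (Int.natCast_nonneg m), hmax _ (by positivity : (0:Int) ≤ (m:Int) + 1)]
    by_cases hm : m < 8
    · interval_cases m <;> decide
    · have h8 : ((CHANNEL_NAME_ORDER.length : Int)) = (8 : Int) := by decide
      have hsl : ∀ k : Nat, 8 ≤ k →
          PySem.List.slice CHANNEL_NAME_ORDER none (some (k : Int)) = CHANNEL_NAME_ORDER := by
        intro k hk
        rw [PySem.List.slice_to_natCast]
        exact List.take_of_length_le (by simpa [CHANNEL_NAME_ORDER] using hk)
      have e1 := hsl m (by omega)
      have e2 : PySem.List.slice CHANNEL_NAME_ORDER none (some ((m : Int) + 1)) = CHANNEL_NAME_ORDER := by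
        rw [← hns]; exact hsl (m + 1) (by omega)
      rw [h8, e1, e2,
        PySem.List.pyRange_one_succ_right (by exact_mod_cast Nat.le_of_not_lt hm : (8:Int) ≤ (m:Int))]
      rw [if_neg (by exact_mod_cast hm)]
      simp [List.append_assoc]

theorem mcn_neg (count : Int) (h : count ≤ 0) :
    map_channel_names count = map_channel_names_alt count := by
  unfold map_channel_names map_channel_names_alt
  rw [PySem.List.pyRange_one_eq_nil h, max_eq_left h]
  decide

-- ===== VERDICT (by name: the statement is the Claim_ definition above) =====
theorem map_channel_names_spec : Claim_equal_map_channel_names := by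
  intro count _
  unfold Spec_map_channel_names
  by_cases h : count ≤ 0
  · exact mcn_neg count h
  · have : count = (count.toNat : Int) := by omega
    rw [this]; exact mcn_nat count.toNat
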